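-- pv_equiv track=rewrite | github.com/sarbeshtiwari/arc-agi-3 | environment_files/eg04/eg04.py | _hit_test_machines
-- ===== SOURCE A (Python) =====
-- GRID_W = 64
--
-- MACHINE_W = 9
--
-- MACHINE_H = 9
--
-- MACHINE_GAP = 2
--
-- def _hit_test_machines(machines, click_x, click_y, base_y):
--     n = len(machines)
--     if n == 0:
--         return -1
--     total_w = n * MACHINE_W + (n - 1) * MACHINE_GAP
--     start_x = (GRID_W - total_w) // 2
--
--     for i, m in enumerate(machines):
--         mx = start_x + i * (MACHINE_W + MACHINE_GAP)
--         my = base_y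
--         if mx <= click_x < mx + MACHINE_W and my <= click_y < my + MACHINE_H:
--             return m
--     return -1
-- ===== SOURCE B (Python) =====
-- GRID_W = 64
-- MACHINE_W = 9
-- MACHINE_H = 9
-- MACHINE_GAP = 2
--
-- def _hit_test_machines(machines, click_x, click_y, base_y):
--     n = len(machines)
--     if n == 0 or not (base_y <= click_y < base_y + MACHINE_H):
--         return -1
--     total_w = n * MACHINE_W + (n - 1) * MACHINE_GAP
--     off = click_x - (GRID_W - total_w) // 2
--     if off < 0:
--         return -1
--     i, pos = divmod(off, MACHINE_W + MACHINE_GAP)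
--     if i < n and pos < MACHINE_W:
--         return machines[i]
--     return -1
-- ===== Notes on version B (the rewrite author's own statement) =====
-- stated objective: faster
-- what changed: B replaces A's linear scan over the machines with O(1) index arithmetic: one y-range test, then divmod of (click_x - start_x) by the 11-cell pitch to locate the hit slot directly.
import Mathlib
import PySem

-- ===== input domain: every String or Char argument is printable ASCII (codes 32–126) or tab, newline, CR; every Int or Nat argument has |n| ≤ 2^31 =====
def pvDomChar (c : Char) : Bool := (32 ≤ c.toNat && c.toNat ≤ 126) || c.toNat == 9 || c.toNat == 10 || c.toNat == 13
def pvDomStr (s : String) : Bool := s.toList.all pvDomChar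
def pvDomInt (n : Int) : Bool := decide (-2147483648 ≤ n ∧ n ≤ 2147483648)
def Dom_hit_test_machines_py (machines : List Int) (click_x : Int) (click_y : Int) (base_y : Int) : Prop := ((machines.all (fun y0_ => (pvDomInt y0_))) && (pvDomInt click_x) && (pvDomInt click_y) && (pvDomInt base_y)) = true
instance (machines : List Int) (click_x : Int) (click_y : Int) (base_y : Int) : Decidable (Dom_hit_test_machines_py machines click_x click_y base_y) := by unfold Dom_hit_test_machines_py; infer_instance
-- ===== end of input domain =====

-- B replaces A's linear scan with O(1) index arithmetic (divmod by the 11-cell pitch); return values proved equal.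

-- ===== PORT A =====
-- the for-loop over enumerate(machines); i is the running index
def hitLoopA (machines : List Int) (click_x : Int) (click_y : Int) (base_y : Int)
    (start_x : Int) (i : Int) : Int :=
  match machines with
  | [] => -1
  | m :: rest =>
    let mx := start_x + i * (9 + 2)
    let my := base_y
    if mx ≤ click_x ∧ click_x < mx + 9 ∧ my ≤ click_y ∧ click_y < my + 9 then m
    else hitLoopA rest click_x click_y base_y start_x (i + 1)

def hit_test_machines_py (machines : List Int) (click_x : Int) (click_y : Int) (base_y : Int) : Int :=
  let n : Int := machines.length
  if n = 0 then -1
  else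
    let total_w := n * 9 + (n - 1) * 2
    let start_x := PySem.Int.floordiv (64 - total_w) 2
    hitLoopA machines click_x click_y base_y start_x 0

-- ===== PORT B =====
def hit_test_machines_py_alt (machines : List Int) (click_x : Int) (click_y : Int) (base_y : Int) : Int :=
  let n : Int := machines.length
  if n = 0 ∨ ¬ (base_y ≤ click_y ∧ click_y < base_y + 9) then -1
  else
    let total_w := n * 9 + (n - 1) * 2
    let off := click_x - PySem.Int.floordiv (64 - total_w) 2
    if off < 0 then -1
    else
      let i := PySem.Int.floordiv off 11
      let pos := PySem.Int.mod off 11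
      -- machines[i]: i is a proven in-range index here, so the getD default is never used
      if i < n ∧ pos < 9 then (PySem.List.pyGet? machines i).getD (-1) else -1

-- ===== PRECONDITION & SPEC =====
def Spec_hit_test_machines_py (machines : List Int) (click_x : Int) (click_y : Int) (base_y : Int) (out : Int) : Prop := out = hit_test_machines_py_alt machines click_x click_y base_y
instance (machines : List Int) (click_x : Int) (click_y : Int) (base_y : Int) (out : Int) : Decidable (Spec_hit_test_machines_py machines click_x click_y base_y out) := by unfold Spec_hit_test_machines_py; infer_instance

-- ===== CLAIM (what is proved, stated in full; the proofs are below) =====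
def Claim_equal_hit_test_machines_py : Prop := ∀ (machines : List Int) (click_x : Int) (click_y : Int) (base_y : Int), Dom_hit_test_machines_py machines click_x click_y base_y → Spec_hit_test_machines_py machines click_x click_y base_y (hit_test_machines_py machines click_x click_y base_y)

-- ===== LEMMAS AND PROOFS =====

-- Characterisation of A's loop in terms of B's divmod arithmetic.
lemma hitLoopA_eq (l : List Int) (cx cy bY sx : Int) : ∀ (i : Int), 0 ≤ i →
    hitLoopA l cx cy bY sx i =
      (if (bY ≤ cy ∧ cy < bY + 9) ∧ 0 ≤ cx - (sx + i * 11) ∧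
          PySem.Int.floordiv (cx - (sx + i * 11)) 11 < (l.length : Int) ∧
          PySem.Int.mod (cx - (sx + i * 11)) 11 < 9
       then (PySem.List.pyGet? l (PySem.Int.floordiv (cx - (sx + i * 11)) 11)).getD (-1)
       else -1) := by
  induction l with
  | nil =>
    intro i hi
    simp only [hitLoopA, List.length_nil, Int.natCast_zero]
    have hq := PySem.Int.floordiv_eq_ediv_of_pos (a := cx - (sx + i * 11)) (b := 11) (by omega)
    rw [hq]
    split_ifs with h
    · exfalso; omega
    · rfl
  | cons m rest ih =>
    intro i hi
    set d := cx - (sx + i * 11) with hd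
    have hdq := PySem.Int.floordiv_eq_ediv_of_pos (a := d) (b := 11) (by omega)
    have hdm := PySem.Int.mod_eq_emod_of_pos (a := d) (b := 11) (by omega)
    have hdq' := PySem.Int.floordiv_eq_ediv_of_pos (a := d - 11) (b := 11) (by omega)
    have hdm' := PySem.Int.mod_eq_emod_of_pos (a := d - 11) (b := 11) (by omega)
    simp only [hitLoopA]
    by_cases hhit : sx + i * (9 + 2) ≤ cx ∧ cx < sx + i * (9 + 2) + 9 ∧ bY ≤ cy ∧ cy < bY + 9
    · rw [if_pos hhit]
      have hdr : 0 ≤ d ∧ d < 9 := by omega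
      have hq0 : PySem.Int.floordiv d 11 = 0 := by rw [hdq]; omega
      have hcond : (bY ≤ cy ∧ cy < bY + 9) ∧ 0 ≤ d ∧
          PySem.Int.floordiv d 11 < ((m :: rest).length : Int) ∧ PySem.Int.mod d 11 < 9 := by
        refine ⟨⟨hhit.2.2.1, hhit.2.2.2⟩, hdr.1, ?_, ?_⟩
        · rw [hq0]; simp
        · rw [hdm]; omega
      rw [if_pos hcond, hq0, PySem.List.pyGet?_zero_cons]
      rfl
    · rw [if_neg hhit]
      rw [ih (i + 1) (by omega)]
      have hd' : cx - (sx + (i + 1) * 11) = d - 11 := by ring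
      rw [hd']
      by_cases hy : bY ≤ cy ∧ cy < bY + 9
      · have hno : d < 0 ∨ 9 ≤ d := by
          by_contra hc
          exact hhit ⟨by omega, by omega, hy.1, hy.2⟩
        by_cases hdlt : d < 11
        · have hA : ¬((bY ≤ cy ∧ cy < bY + 9) ∧ 0 ≤ d - 11 ∧
              PySem.Int.floordiv (d - 11) 11 < (rest.length : Int) ∧ PySem.Int.mod (d - 11) 11 < 9) := by
            rintro ⟨-, h0, -, -⟩; omega
          have hB : ¬((bY ≤ cy ∧ cy < bY + 9) ∧ 0 ≤ d ∧
              PySem.Int.floordiv d 11 < (((m :: rest).length : Int)) ∧ PySem.Int.mod d 11 < 9) := by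
            rintro ⟨-, h0, -, hm⟩
            rw [hdm] at hm; omega
          rw [if_neg hA, if_neg hB]
        · have hd11 : 11 ≤ d := by omega
          have hqs : PySem.Int.floordiv d 11 = PySem.Int.floordiv (d - 11) 11 + 1 := by
            rw [hdq, hdq']; omega
          have hms : PySem.Int.mod d 11 = PySem.Int.mod (d - 11) 11 := by
            rw [hdm, hdm']; omega
          have hq0' : 0 ≤ PySem.Int.floordiv (d - 11) 11 := by rw [hdq']; omega
          rw [hqs, hms]
          split_ifs with h1 h2 h2
          · congr 1
            set q := PySem.Int.floordiv (d - 11) 11 with hqdef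
            have h0 : PySem.List.pyGet? (m :: rest) (q + 1) = (m :: rest)[(q + 1).toNat]? :=
              PySem.List.pyGet?_of_nonneg _ (by omega)
            have h0' : PySem.List.pyGet? rest q = rest[q.toNat]? :=
              PySem.List.pyGet?_of_nonneg _ (by omega)
            have ht : (q + 1).toNat = q.toNat + 1 := by omega
            rw [h0, h0', ht]
            simp
          · exfalso; apply h2
            obtain ⟨a, b, c, e⟩ := h1
            refine ⟨a, by omega, ?_, e⟩
            simp only [List.length_cons]
            push_cast at c ⊢; omega
          · exfalso; apply h1
            obtain ⟨a, b, c, e⟩ := h2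
            simp only [List.length_cons] at c
            refine ⟨a, by omega, ?_, e⟩
            push_cast at c ⊢; omega
          · rfl
      · rw [if_neg (by tauto), if_neg (by tauto)]

-- ===== VERDICT (by name: the statement is the Claim_ definition above) =====
theorem hit_test_machines_py_spec : Claim_equal_hit_test_machines_py := by
  intro machines cx cy bY _
  unfold Spec_hit_test_machines_py
  unfold hit_test_machines_py hit_test_machines_py_alt
  by_cases hn : (machines.length : Int) = 0
  · simp [hn]
  · simp only [hn, false_or, if_false]
    rw [hitLoopA_eq machines cx cy bY _ 0 le_rfl]
    simp only [zero_mul, add_zero]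
    set sx := PySem.Int.floordiv (64 - ((machines.length : Int) * 9 + ((machines.length : Int) - 1) * 2)) 2 with hsx
    by_cases hy : bY ≤ cy ∧ cy < bY + 9
    · rw [if_neg (not_not_intro hy)]
      by_cases hoff : cx - sx < 0
      · rw [if_pos hoff, if_neg (by rintro ⟨-, h0, -⟩; omega)]
      · rw [if_neg hoff]
        by_cases hqr : PySem.Int.floordiv (cx - sx) 11 < (machines.length : Int) ∧
            PySem.Int.mod (cx - sx) 11 < 9
        · rw [if_pos ⟨hy, by omega, hqr.1, hqr.2⟩, if_pos hqr]
        · rw [if_neg (fun h => hqr ⟨h.2.2.1, h.2.2.2⟩), if_neg hqr]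
    · rw [if_pos hy, if_neg (fun h => hy h.1)]
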